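-- pv_equiv track=rewrite | github.com/michaelmech/Pluribass | data_gen.py | determine_phase
-- ===== SOURCE A (Python) =====
-- def determine_phase(action_idx, actions):
--     board_card_actions = [i for i, a in enumerate(actions) if a.startswith('d db')]
--     if not board_card_actions:
--         return 'preflop'
--     elif action_idx < board_card_actions[0]:
--         return 'preflop'
--     elif len(board_card_actions) == 1 or action_idx < board_card_actions[1]:
--         return 'flop'
--     elif len(board_card_actions) == 2 or action_idx < board_card_actions[2]:
--         return 'turn'
--     else:
--         return 'river'
-- ===== SOURCE B (Python) =====
-- def determine_phase(action_idx, actions):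
--     count = 0
--     for i, a in enumerate(actions):
--         if a.startswith('d db') and i <= action_idx:
--             count += 1
--     return ['preflop', 'flop', 'turn', 'river'][min(count, 3)]
-- ===== Notes on version B (the rewrite author's own statement) =====
-- stated objective: simpler
-- what changed: Replaces the index-list build plus four-way comparison cascade by a single counter of board-card actions at or before action_idx, mapped through a phase table.
import Mathlib
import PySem

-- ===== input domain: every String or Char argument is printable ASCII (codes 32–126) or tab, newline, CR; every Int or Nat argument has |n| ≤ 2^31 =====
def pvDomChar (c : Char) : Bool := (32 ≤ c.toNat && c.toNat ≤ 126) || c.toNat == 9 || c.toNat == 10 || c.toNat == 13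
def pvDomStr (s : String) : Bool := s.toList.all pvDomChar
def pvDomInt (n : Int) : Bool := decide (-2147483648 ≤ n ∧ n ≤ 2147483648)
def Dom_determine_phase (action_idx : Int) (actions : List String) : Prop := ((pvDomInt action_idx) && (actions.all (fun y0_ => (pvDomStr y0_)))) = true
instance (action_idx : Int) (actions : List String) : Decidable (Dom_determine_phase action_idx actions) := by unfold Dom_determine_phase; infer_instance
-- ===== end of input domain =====

-- B replaces A's index-list build and four-way comparison cascade by one counter mapped through a phase table (objective: simpler).

-- ===== PORT A =====
def determine_phase (action_idx : Int) (actions : List String) : String :=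
  match ((PySem.List.enumerate actions).filter
      (fun p => PySem.Str.startswith p.2 "d db")).map Prod.fst with
  | [] => "preflop"
  | b0 :: t =>
    if action_idx < b0 then "preflop"
    else match t with
      | [] => "flop"                                  -- len(board_card_actions) == 1
      | b1 :: t2 =>
        if action_idx < b1 then "flop"
        else match t2 with
          | [] => "turn"                              -- len(board_card_actions) == 2
          | b2 :: _ => if action_idx < b2 then "turn" else "river"

-- ===== PORT B =====
def determine_phase_alt (action_idx : Int) (actions : List String) : String :=
  -- the index min(count,3) always lies in range; .getD only makes the lookup total
  (PySem.List.pyGet? ["preflop", "flop", "turn", "river"]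
    (min ((PySem.List.enumerate actions).foldl
      (fun c p => if PySem.Str.startswith p.2 "d db" ∧ p.1 ≤ action_idx then c + 1 else c) 0)
      3)).getD "preflop"

-- ===== PRECONDITION & SPEC =====
def Spec_determine_phase (action_idx : Int) (actions : List String) (out : String) : Prop := out = determine_phase_alt action_idx actions
instance (action_idx : Int) (actions : List String) (out : String) : Decidable (Spec_determine_phase action_idx actions out) := by unfold Spec_determine_phase; infer_instance

-- ===== CLAIM (what is proved, stated in full; the proofs are below) =====
def Claim_equal_determine_phase : Prop := ∀ (action_idx : Int) (actions : List String), Dom_determine_phase action_idx actions → Spec_determine_phase action_idx actions (determine_phase action_idx actions)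

-- ===== LEMMAS AND PROOFS =====

-- B's counter equals the number of board-card indices ≤ action_idx.
theorem pv_count_eq (action_idx : Int) (actions : List String) :
    (PySem.List.enumerate actions).foldl
      (fun c p => if PySem.Str.startswith p.2 "d db" ∧ p.1 ≤ action_idx then c + 1 else c) 0
    = ((((PySem.List.enumerate actions).filter
          (fun p => PySem.Str.startswith p.2 "d db")).map Prod.fst).countP
        (fun b => b ≤ action_idx) : Int) := by
  rw [PySem.List.foldl_ite_add_one]
  rw [List.countP_map, List.countP_filter]
  simp only [zero_add, Int.natCast_inj]
  apply List.countP_congr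
  intro p _
  by_cases h1 : PySem.Str.startswith p.2 "d db" = true <;>
    by_cases h2 : p.1 ≤ action_idx <;> simp [h2, Function.comp]

-- the board-card index list is strictly increasing
theorem pv_bs_pairwise (actions : List String) :
    ((((PySem.List.enumerate actions).filter
        (fun p => PySem.Str.startswith p.2 "d db")).map Prod.fst)).Pairwise (· < ·) := by
  rw [List.pairwise_map]
  exact List.Pairwise.sublist List.filter_sublist (PySem.List.pairwise_lt_enumerate actions 0)

-- proof-only helper: A's comparison cascade as a standalone function
def pvCascade (idx : Int) (bs : List Int) : String :=
  match bs with
  | [] => "preflop"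
  | b0 :: t =>
    if idx < b0 then "preflop"
    else match t with
      | [] => "flop"
      | b1 :: t2 =>
        if idx < b1 then "flop"
        else match t2 with
          | [] => "turn"
          | b2 :: _ => if idx < b2 then "turn" else "river"

-- the cascade over a strictly increasing list equals the counter lookup
theorem pv_cascade (idx : Int) (bs : List Int) (h : bs.Pairwise (· < ·)) :
    pvCascade idx bs
    = (PySem.List.pyGet? ["preflop", "flop", "turn", "river"]
        (min ((bs.countP (fun b => b ≤ idx) : Int)) 3)).getD "preflop" := by
  rcases bs with _ | ⟨b0, t⟩
  · simp [pvCascade, PySem.List.pyGet?, PySem.List.pyIdx?]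
  · rcases List.pairwise_cons.mp h with ⟨h0, ht⟩
    by_cases hb0 : idx < b0
    · have : (b0 :: t).countP (fun b => b ≤ idx) = 0 := by
        rw [List.countP_eq_zero]
        intro a ha
        rcases List.mem_cons.mp ha with rfl | ha
        · simpa using not_le.mpr hb0
        · simpa using not_le.mpr (lt_trans hb0 (h0 a ha))
      simp [pvCascade, this, hb0, PySem.List.pyGet?, PySem.List.pyIdx?]
    · rcases t with _ | ⟨b1, t2⟩
      · simp [pvCascade, hb0, not_lt.mp hb0, PySem.List.pyGet?, PySem.List.pyIdx?]
      · rcases List.pairwise_cons.mp ht with ⟨h1, ht2⟩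
        by_cases hb1 : idx < b1
        · have : (b1 :: t2).countP (fun b => b ≤ idx) = 0 := by
            rw [List.countP_eq_zero]
            intro a ha
            rcases List.mem_cons.mp ha with rfl | ha
            · simpa using not_le.mpr hb1
            · simpa using not_le.mpr (lt_trans hb1 (h1 a ha))
          simp [pvCascade, this, hb0, hb1, not_lt.mp hb0, PySem.List.pyGet?, PySem.List.pyIdx?]
        · rcases t2 with _ | ⟨b2, t3⟩
          · simp [pvCascade, hb0, hb1, not_lt.mp hb0, not_lt.mp hb1, PySem.List.pyGet?, PySem.List.pyIdx?]
          · rcases List.pairwise_cons.mp ht2 with ⟨h2, -⟩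
            by_cases hb2 : idx < b2
            · have : (b2 :: t3).countP (fun b => b ≤ idx) = 0 := by
                rw [List.countP_eq_zero]
                intro a ha
                rcases List.mem_cons.mp ha with rfl | ha
                · simpa using not_le.mpr hb2
                · simpa using not_le.mpr (lt_trans hb2 (h2 a ha))
              simp [pvCascade, this, hb0, hb1, hb2, not_lt.mp hb0, not_lt.mp hb1, PySem.List.pyGet?, PySem.List.pyIdx?]
            · have hk : min (((b0 :: b1 :: b2 :: t3).countP (fun b => b ≤ idx) : Int)) 3 = 3 := by
                have : (b0 :: b1 :: b2 :: t3).countP (fun b => b ≤ idx)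
                    = 3 + t3.countP (fun b => b ≤ idx) := by
                  simp [not_lt.mp hb0, not_lt.mp hb1, not_lt.mp hb2]
                  omega
                rw [this]; omega
              simp only [hk]
              simp [pvCascade, hb0, hb1, hb2, PySem.List.pyGet?, PySem.List.pyIdx?]

-- ===== VERDICT (by name: the statement is the Claim_ definition above) =====
theorem determine_phase_spec : Claim_equal_determine_phase := by
  intro action_idx actions _
  unfold Spec_determine_phase determine_phase determine_phase_alt
  rw [pv_count_eq]
  exact pv_cascade action_idx _ (pv_bs_pairwise actions)
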